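-- pv_equiv track=rewrite | github.com/sekhar-madha/become_coder_python | is_neighbor.py | isNeighbour
-- ===== SOURCE A (Python) =====
-- def isNeighbour(N):
--     ##Your code here
--     r=range(-2,3)
--     l=list(map(lambda x:x+N,r))
--     for i in l:
--         if i%10==0:
--             return True
--             break
--         else:
--             pass
--     else:
--         return False
-- ===== SOURCE B (Python) =====
-- def isNeighbour(N):
--     return N % 10 in (0, 1, 2, 8, 9)
-- ===== Notes on version B (the rewrite author's own statement) =====
-- stated objective: simpler
-- what changed: Replaces the loop over the five offsets with a closed-form membership test of the residue N mod 10 against the fixed set of residues adjacent to a multiple of ten.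
import Mathlib
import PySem

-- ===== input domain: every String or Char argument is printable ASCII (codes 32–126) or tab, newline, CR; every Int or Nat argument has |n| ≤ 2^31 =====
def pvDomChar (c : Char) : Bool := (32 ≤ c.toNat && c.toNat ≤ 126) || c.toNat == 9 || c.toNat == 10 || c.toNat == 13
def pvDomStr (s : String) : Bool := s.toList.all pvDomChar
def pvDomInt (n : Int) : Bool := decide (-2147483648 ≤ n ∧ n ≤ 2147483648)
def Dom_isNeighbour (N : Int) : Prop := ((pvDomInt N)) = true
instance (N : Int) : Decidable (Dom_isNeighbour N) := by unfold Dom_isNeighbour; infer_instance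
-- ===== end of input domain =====

-- ===== PORT A =====
-- the for-loop over l with early return True, else-clause returns False
def isNeighbourLoop : List Int → Bool
  | [] => false
  | i :: rest => if PySem.Int.mod i 10 == 0 then true else isNeighbourLoop rest

def isNeighbour (N : Int) : Bool :=
  let r := PySem.List.pyRange (-2) 3 1
  let l := r.map (fun x => x + N)
  isNeighbourLoop l

-- ===== PORT B =====
-- B: closed form, N % 10 in (0, 1, 2, 8, 9)
def isNeighbour_alt (N : Int) : Bool :=
  [0, 1, 2, 8, 9].contains (PySem.Int.mod N 10)

-- ===== PRECONDITION & SPEC =====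
def Spec_isNeighbour (N : Int) (out : Bool) : Prop := out = isNeighbour_alt N
instance (N : Int) (out : Bool) : Decidable (Spec_isNeighbour N out) := by unfold Spec_isNeighbour; infer_instance

-- ===== CLAIM (what is proved, stated in full; the proofs are below) =====
def Claim_equal_isNeighbour : Prop := ∀ (N : Int), Dom_isNeighbour N → Spec_isNeighbour N (isNeighbour N)

-- ===== LEMMAS AND PROOFS =====

-- ===== VERDICT (by name: the statement is the Claim_ definition above) =====
theorem isNeighbour_spec : Claim_equal_isNeighbour := by
  intro N _
  unfold Spec_isNeighbour isNeighbour isNeighbour_alt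
  have hr : PySem.List.pyRange (-2) 3 1 = [-2, -1, 0, 1, 2] := by decide
  rw [hr]
  simp only [List.map, isNeighbourLoop, List.contains, List.elem_eq_mem, List.mem_cons,
    List.not_mem_nil, or_false, PySem.Int.mod_eq_emod_of_pos (by norm_num : (0:Int) < 10),
    beq_iff_eq]
  split_ifs <;> simp_all <;> omega
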